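-- pv_equiv track=rewrite | github.com/laurengsabo/CS1301 | HW09.py | balancedStr
-- ===== SOURCE A (Python) =====
-- def balancedStr(word):
--     if len(word) == 1 or 0:
--         return True
--     else:
--         if word == "":
--             return True
--         if word[0].islower() == word[len(word)-1].islower() or word[0].isupper() == word[len(word)-1].isupper():
--             return balancedStr(word[1:(len(word)-1)])
--         else:
--             return False
-- ===== SOURCE B (Python) =====
-- def balancedStr(word):
--     i, j = 0, len(word) - 1
--     while i < j:
--         a, b = word[i], word[j]
--         if (a.islower() and b.isupper()) or (a.isupper() and b.islower()):
--             return False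
--         i += 1
--         j -= 1
--     return True
-- ===== Notes on version B (the rewrite author's own statement) =====
-- stated objective: faster
-- what changed: Replaced the O(n^2) recursion that re-slices the string at every level with a single iterative two-pointer scan comparing symmetric characters in place.
import Mathlib
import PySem

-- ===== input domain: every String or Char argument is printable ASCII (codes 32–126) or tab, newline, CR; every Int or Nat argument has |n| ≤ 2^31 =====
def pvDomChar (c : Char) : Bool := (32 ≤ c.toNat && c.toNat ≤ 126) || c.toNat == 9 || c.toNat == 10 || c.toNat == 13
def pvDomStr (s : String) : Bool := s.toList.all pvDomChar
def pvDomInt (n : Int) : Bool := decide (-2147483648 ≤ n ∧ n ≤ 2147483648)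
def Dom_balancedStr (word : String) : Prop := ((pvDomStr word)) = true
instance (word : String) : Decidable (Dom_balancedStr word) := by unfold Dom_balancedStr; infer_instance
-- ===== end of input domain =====

-- B replaces A's O(n^2) end-stripping recursion (a fresh slice per level) by one O(n) two-pointer scan.

-- ===== PORT A =====
-- c.islower() / c.isupper() for a single char: exact on printable ASCII (cased chars are exactly a-z / A-Z)
def pvIsLower (c : Char) : Bool := 97 ≤ c.toNat && c.toNat ≤ 122
def pvIsUpper (c : Char) : Bool := 65 ≤ c.toNat && c.toNat ≤ 90

def balancedStrChars (cs : List Char) : Bool :=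
  if cs.length = 1 then true            -- 'len(word) == 1 or 0': the 'or 0' is falsy, no effect
  else if cs = [] then true
  else if (pvIsLower cs[0]! == pvIsLower cs[cs.length - 1]!)
          || (pvIsUpper cs[0]! == pvIsUpper cs[cs.length - 1]!) then
    balancedStrChars (PySem.List.slice cs (some 1) (some ((cs.length : Int) - 1)))
  else false
termination_by cs.length
decreasing_by
  rename_i h1 h2 h3
  have hlen : 1 ≤ cs.length := by
    cases cs with
    | nil => exact absurd rfl h2
    | cons a t => simp
  rw [PySem.List.slice_of_nonneg cs (by omega) (by omega) (by omega) (by omega)]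
  simp
  omega

def balancedStr (word : String) : Bool := balancedStrChars word.toList

-- ===== PORT B =====
def balancedStrLoop (cs : List Char) (i j : Nat) : Bool :=
  if i < j then
    let a := cs[i]!
    let b := cs[j]!
    if (pvIsLower a && pvIsUpper b) || (pvIsUpper a && pvIsLower b) then false
    else balancedStrLoop cs (i + 1) (j - 1)
  else true
termination_by j - i

def balancedStr_alt (word : String) : Bool :=
  balancedStrLoop word.toList 0 (word.toList.length - 1)

-- ===== PRECONDITION & SPEC =====
def Spec_balancedStr (word : String) (out : Bool) : Prop := out = balancedStr_alt word
instance (word : String) (out : Bool) : Decidable (Spec_balancedStr word out) := by unfold Spec_balancedStr; infer_instance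

-- ===== CLAIM (what is proved, stated in full; the proofs are below) =====
def Claim_equal_balancedStr : Prop := ∀ (word : String), Dom_balancedStr word → Spec_balancedStr word (balancedStr word)

-- ===== LEMMAS AND PROOFS =====

-- a char is never both a lowercase and an uppercase letter
lemma pv_not_both (c : Char) : ¬ (pvIsLower c = true ∧ pvIsUpper c = true) := by
  simp [pvIsLower, pvIsUpper]
  omega

-- A's keep-going test is the negation of B's fail test (given no char is both cases)
lemma pv_cond (a b : Char) :
    ((pvIsLower a == pvIsLower b) || (pvIsUpper a == pvIsUpper b))
      = !((pvIsLower a && pvIsUpper b) || (pvIsUpper a && pvIsLower b)) := by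
  have ha := pv_not_both a
  have hb := pv_not_both b
  cases hla : pvIsLower a <;> cases hua : pvIsUpper a <;>
    cases hlb : pvIsLower b <;> cases hub : pvIsUpper b <;>
    simp_all

lemma balancedStrChars_short (cs : List Char) (h : cs.length ≤ 1) :
    balancedStrChars cs = true := by
  cases cs with
  | nil => simp [balancedStrChars]
  | cons a t =>
    cases t with
    | nil => simp [balancedStrChars]
    | cons b u => simp at h

-- the two-pointer loop on cs over [i, j] computes A's recursion on the segment cs[i..j]
lemma pv_key (cs : List Char) (i j : Nat) (hj : j < cs.length) :
    balancedStrLoop cs i j = balancedStrChars ((cs.drop i).take (j + 1 - i)) := by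
  by_cases hij : i < j
  · have hseglen : ((cs.drop i).take (j + 1 - i)).length = j + 1 - i := by
      simp
      omega
    have h0 : ((cs.drop i).take (j + 1 - i))[0]! = cs[i]! := by
      rw [getElem!_pos _ _ (by omega), getElem!_pos _ _ (by omega)]
      simp [List.getElem_take]
    have hlast : ((cs.drop i).take (j + 1 - i))[((cs.drop i).take (j + 1 - i)).length - 1]! = cs[j]! := by
      rw [hseglen, getElem!_pos _ _ (by omega), getElem!_pos _ _ (by omega)]
      simp [List.getElem_take]
      congr 1
      omega
    have hslice : PySem.List.slice ((cs.drop i).take (j + 1 - i)) (some 1)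
        (some ((((cs.drop i).take (j + 1 - i)).length : Int) - 1))
        = (cs.drop (i + 1)).take (j - 1 + 1 - (i + 1)) := by
      rw [PySem.List.slice_of_nonneg _ (by omega) (by rw [hseglen]; omega)
        (by rw [hseglen]; omega) (by rw [hseglen]; omega)]
      simp only [hseglen, Int.toNat_one]
      rw [List.drop_take, List.drop_drop, List.take_take]
      congr 1
      omega
    have hne : (cs.drop i).take (j + 1 - i) ≠ [] := by
      intro hnil
      rw [hnil] at hseglen
      simp at hseglen
      omega
    have hne1 : ¬ ((cs.drop i).take (j + 1 - i)).length = 1 := by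
      rw [hseglen]; omega
    rw [balancedStrLoop, if_pos hij, balancedStrChars]
    rw [if_neg hne1, if_neg hne]
    rw [h0, hlast, hslice, pv_cond]
    rcases Bool.eq_false_or_eq_true
        ((pvIsLower cs[i]! && pvIsUpper cs[j]!) || (pvIsUpper cs[i]! && pvIsLower cs[j]!)) with hc | hc
    · simp only [hc, Bool.not_true, Bool.false_eq_true, if_true, if_false]
    · simp only [hc, Bool.not_false, Bool.false_eq_true, if_false, if_true]
      exact pv_key cs (i + 1) (j - 1) (by omega)
  · rw [balancedStrLoop, if_neg hij]
    rw [balancedStrChars_short _ (by simp; omega)]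
termination_by j - i

-- ===== VERDICT (by name: the statement is the Claim_ definition above) =====
theorem balancedStr_spec : Claim_equal_balancedStr := by
  intro word _
  unfold Spec_balancedStr balancedStr balancedStr_alt
  cases hcs : word.toList with
  | nil => simp [balancedStrLoop, balancedStrChars]
  | cons a t =>
    rw [pv_key _ 0 ((a :: t).length - 1) (by simp)]
    simp
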